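-- pv_equiv track=rewrite | github.com/zacheen/python | question_practice/leetcode/Contest result/Biweekly Contest 160/4_3605. Minimum Stability Factor of Array/A.py | minStable
-- ===== SOURCE A (Python) =====
-- from typing import List
-- from math import inf, gcd
-- from functools import cache
--
-- class SegTree:
--     def __init__(self, nums):
--         self.n = len(nums)
--         # init
--         self.tree = [0] * 2 * self.n
--         for i,n in zip(range(self.n, 2 * self.n) , nums):
--             self.tree[i] = n
--         for i in range(self.n-1, 0, -1):
--             # execute def
--             self.tree[i] = gcd(self.tree[i<<1], self.tree[(i<<1)+1])
--
--     def query(self, left, right):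
--         # include
--         left += self.n
--         right += self.n
--         res = None
--         while left <= right:
--             if left & 1 :
--                 # combine result
--                 res = gcd(res,self.tree[left]) if res != None else self.tree[left]
--                 left += 1
--             if not (right & 1) :
--                 # combine result
--                 res = gcd(res,self.tree[right]) if res != None else self.tree[right]
--                 right -= 1
--             left >>= 1
--             right>>= 1
--         return res
--
-- def minStable(nums: List[int], maxC: int) -> int:
--     if maxC >= (len(nums)-sum(n == 1 for n in nums)) : return 0
--
--     segtree = SegTree(nums)
--     @cache
--     def check(limit_len): # limit_len is available
--         if limit_len == 1 : return True
--         now_i = 0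
--         end_i = len(nums)-limit_len
--         rem_ch = maxC
--         while now_i <= end_i :
--             if segtree.query(now_i, now_i+limit_len-1) >= 2 :
--                 rem_ch -= 1
--                 if rem_ch < 0 :
--                     return True
--                 now_i += limit_len
--                 continue
--             now_i += 1
--         return False
--
--     left, right = 1, len(nums)//(maxC+1) # right 通常會超出界線(因為執行的時候不會執行到這個數字) # 但是最後 l 有可能會超出範圍
--     while left < right:
--         mid = (left + right) >> 1
--         if check(mid) : # 條件 (如果 == target 的情況 要是 False)
--             # 沒通過 或 數字應該要往大的方向跑(目標沒有在 left 跟 mid 之間)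
--             left = mid + 1 # 需注意 left 不會停留在 mid !
--         else:
--             # 通過(包含 == target 的情況)
--             right = mid
--
--     # # 如果要找的是上界 (=找到第一個超出的位置 -1)
--     if check(left) : return left
--     else : return left-1
-- ===== SOURCE B (Python) =====
-- from typing import List
-- from math import gcd
--
-- def minStable(nums: List[int], maxC: int) -> int:
--     n = len(nums)
--     if maxC >= n - nums.count(1):
--         return 0
--
--     # sparse table: table[k][i] = gcd of nums[i .. i+2^k-1], O(1) range-gcd queries
--     table = [nums[:]]
--     p = 1
--     while 2 * p <= n:
--         prev = table[-1]
--         table.append([gcd(prev[i], prev[i + p]) for i in range(len(prev) - p)])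
--         p *= 2
--
--     def query(l, r):
--         k = (r - l + 1).bit_length() - 1
--         row = table[k]
--         return gcd(row[l], row[r - (1 << k) + 1])
--
--     def check(L):
--         if L == 1:
--             return True
--         i, cnt = 0, 0
--         while i + L <= n:
--             if query(i, i + L - 1) >= 2:
--                 cnt += 1
--                 i += L
--             else:
--                 i += 1
--         return cnt > maxC
--
--     left, right = 1, n // (maxC + 1)
--     while left < right:
--         mid = (left + right) >> 1
--         if check(mid):
--             left = mid + 1
--         else:
--             right = mid
--
--     return left if check(left) else left - 1
-- ===== Notes on version B (the rewrite author's own statement) =====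
-- stated objective: alternative
-- what changed: B replaces A's bottom-up segment tree (O(log n) per range-gcd query) by a sparse table built once that answers each range-gcd query in O(1) via two overlapping power-of-two windows, keeping the same greedy coverage check and binary search; B also counts windows up instead of decrementing a budget and uses nums.count(1) instead of a generator sum.
import Mathlib
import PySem

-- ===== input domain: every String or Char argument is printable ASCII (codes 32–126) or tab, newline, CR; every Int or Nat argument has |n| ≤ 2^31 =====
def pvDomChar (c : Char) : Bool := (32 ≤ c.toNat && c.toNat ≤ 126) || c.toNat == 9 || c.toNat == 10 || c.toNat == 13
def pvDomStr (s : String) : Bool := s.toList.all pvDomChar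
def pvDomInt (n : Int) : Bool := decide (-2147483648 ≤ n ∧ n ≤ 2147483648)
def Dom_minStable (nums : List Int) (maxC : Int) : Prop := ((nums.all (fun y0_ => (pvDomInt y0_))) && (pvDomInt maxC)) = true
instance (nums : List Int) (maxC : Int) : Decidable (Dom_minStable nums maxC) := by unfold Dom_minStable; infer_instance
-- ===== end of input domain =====

-- B replaces A's segment tree by a sparse table (O(1) gcd range queries instead of O(log n) per query),
-- keeping the same greedy coverage check and binary search.

-- math.gcd of two ints (Python returns the nonnegative gcd)
def pyGcd (a b : Int) : Int := (Int.gcd a b : Int)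

-- ===== PORT A =====
-- tree[i]: every tree access A makes is in range (proved below), so the default 0 is never read
def tGet (t : List Int) (i : Int) : Int := PySem.List.pyGetD t i 0

-- 'self.tree = [0]*2*n; for i,x in zip(range(n, 2*n), nums): tree[i] = x'
def segInit (nums : List Int) : List Int :=
  (List.zip (PySem.List.pyRange (nums.length : Int) (2 * nums.length : Int) 1) nums).foldl
    (fun t p => PySem.List.pySetD t p.1 p.2) (List.replicate (2 * nums.length) 0)

-- 'for i in range(n-1, 0, -1): tree[i] = gcd(tree[i<<1], tree[(i<<1)+1])'  (i counts down to 1)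
def segBuild (t : List Int) : Nat → List Int
  | 0 => t
  | (i+1) => segBuild (PySem.List.pySetD t ((i:Int)+1)
      (pyGcd (tGet t (2*((i:Int)+1))) (tGet t (2*((i:Int)+1)+1)))) i

-- 'res = gcd(res, tree[j]) if res != None else tree[j]'
def segCombine (res : Option Int) (x : Int) : Int :=
  match res with | none => x | some v => pyGcd v x

-- the 'while left <= right' query loop; the fuel only makes it total (2n+2 always suffices, proved below)
def segQLoop (t : List Int) : Nat → Int → Int → Option Int → Option Int
  | 0, _, _, res => res
  | (fuel+1), left, right, res =>
    if left ≤ right then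
      let p1 := if PySem.Int.band left 1 ≠ 0
        then (some (segCombine res (tGet t left)), left + 1) else (res, left)
      let p2 := if PySem.Int.band right 1 = 0
        then (some (segCombine p1.1 (tGet t right)), right - 1) else (p1.1, right)
      segQLoop t fuel (p1.2 >>> (1:Nat)) (p2.2 >>> (1:Nat)) p2.1
    else res

-- 'left += self.n; right += self.n; res = None; while ...'
def segQuery (t : List Int) (n : Nat) (l r : Int) : Option Int :=
  segQLoop t (2*n+2) (l + n) (r + n) none

-- check's 'while now_i <= end_i' loop (fuel n+1 always suffices: now_i grows every iteration)
def checkALoop (t : List Int) (n : Nat) (maxCL : Int × Int) : Nat → Int → Int → Bool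
  | 0, _, _ => false
  | (fuel+1), now_i, rem =>
    if now_i ≤ (n:Int) - maxCL.2 then
      -- Python compares 'query(...) >= 2'; the query never returns None here (the range is non-empty)
      if (segQuery t n now_i (now_i + maxCL.2 - 1)).getD 0 ≥ 2 then
        if rem - 1 < 0 then true
        else checkALoop t n maxCL fuel (now_i + maxCL.2) (rem - 1)
      else checkALoop t n maxCL fuel (now_i + 1) rem
    else false

def checkA (t : List Int) (n : Nat) (maxC L : Int) : Bool :=
  if L = 1 then true else checkALoop t n (maxC, L) (n+1) 0 maxC

-- 'while left < right' binary search (fuel (right-left)+1 suffices: the interval shrinks every step)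
def bsA (t : List Int) (n : Nat) (maxC : Int) : Nat → Int → Int → Int
  | 0, left, _ => left
  | (fuel+1), left, right =>
    if left < right then
      let mid := (left + right) >>> (1:Nat)
      if checkA t n maxC mid then bsA t n maxC fuel (mid + 1) right
      else bsA t n maxC fuel left mid
    else left

def minStable (nums : List Int) (maxC : Int) : Int :=
  let n := nums.length
  if maxC ≥ (n:Int) - ((nums.map (fun x => if x = 1 then (1:Int) else 0)).sum) then 0
  else
    let tree := segBuild (segInit nums) (n-1)
    let right := PySem.Int.floordiv (n:Int) (maxC+1)
    let left := bsA tree n maxC ((right - 1).toNat + 1) 1 right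
    if checkA tree n maxC left then left else left - 1

-- ===== PORT B =====
-- sparse-table build: 'table = [nums[:]]; p = 1; while 2*p <= n: table.append(row); p *= 2'
def stLoop (n : Nat) : Nat → List (List Int) → Int → List (List Int)
  | 0, acc, _ => acc
  | (fuel+1), acc, p =>
    if 2*p ≤ (n:Int) then
      let prev := (PySem.List.pyGet? acc (-1)).getD []
      let row := (PySem.List.pyRange 0 ((prev.length : Int) - p) 1).map
        (fun i => pyGcd (PySem.List.pyGetD prev i 0) (PySem.List.pyGetD prev (i + p) 0))
      stLoop n fuel (acc ++ [row]) (2*p)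
    else acc

def stBuild (nums : List Int) : List (List Int) :=
  stLoop nums.length (nums.length + 1) [nums] 1

-- 'k = (r-l+1).bit_length()-1; gcd(table[k][l], table[k][r-(1<<k)+1])'
def stQuery (table : List (List Int)) (l r : Int) : Int :=
  let k := PySem.Int.bitLength (r - l + 1) - 1
  let row := (PySem.List.pyGet? table (k:Int)).getD []
  pyGcd (PySem.List.pyGetD row l 0) (PySem.List.pyGetD row (r - ((1:Int) <<< k) + 1) 0)

def checkBLoop (table : List (List Int)) (n : Nat) (maxCL : Int × Int) : Nat → Int → Int → Bool
  | 0, _, _ => false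
  | (fuel+1), i, cnt =>
    if i + maxCL.2 ≤ (n:Int) then
      if stQuery table i (i + maxCL.2 - 1) ≥ 2 then checkBLoop table n maxCL fuel (i + maxCL.2) (cnt + 1)
      else checkBLoop table n maxCL fuel (i + 1) cnt
    else decide (cnt > maxCL.1)

def checkB (table : List (List Int)) (n : Nat) (maxC L : Int) : Bool :=
  if L = 1 then true else checkBLoop table n (maxC, L) (n+1) 0 0

def bsB (table : List (List Int)) (n : Nat) (maxC : Int) : Nat → Int → Int → Int
  | 0, left, _ => left
  | (fuel+1), left, right =>
    if left < right then
      let mid := (left + right) >>> (1:Nat)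
      if checkB table n maxC mid then bsB table n maxC fuel (mid + 1) right
      else bsB table n maxC fuel left mid
    else left

def minStable_alt (nums : List Int) (maxC : Int) : Int :=
  let n := nums.length
  if maxC ≥ (n:Int) - (PySem.List.count nums 1 : Int) then 0
  else
    let table := stBuild nums
    let right := PySem.Int.floordiv (n:Int) (maxC+1)
    let left := bsB table n maxC ((right - 1).toNat + 1) 1 right
    if checkB table n maxC left then left else left - 1

-- ===== PRECONDITION & SPEC =====
-- Pre_ excludes exactly maxC = -1, where A raises ZeroDivisionError on 'len(nums)//(maxC+1)'
-- (B's identical binary-search bounds raise there too).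
def Pre_minStable (nums : List Int) (maxC : Int) : Prop := maxC ≠ -1
instance (nums : List Int) (maxC : Int) : Decidable (Pre_minStable nums maxC) := by
  unfold Pre_minStable; infer_instance

def pvWitness_minStable : List Int × Int := ([2, 4, 1, 6], 1)

def Spec_minStable (nums : List Int) (maxC : Int) (out : Int) : Prop := out = minStable_alt nums maxC
instance (nums : List Int) (maxC : Int) (out : Int) : Decidable (Spec_minStable nums maxC out) := by
  unfold Spec_minStable; infer_instance

-- ===== CLAIM (what is proved, stated in full; the proofs are below) =====
def Claim_equal_minStable : Prop := ∀ (nums : List Int) (maxC : Int), Dom_minStable nums maxC → Pre_minStable nums maxC → Spec_minStable nums maxC (minStable nums maxC)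

-- ===== LEMMAS AND PROOFS =====

-- canonical range gcd: Nat.gcd-fold of |.| over a window of nums
def gcdAcc (g : Nat) (x : Int) : Nat := Nat.gcd g x.natAbs
def natFold (l : List Int) : Nat := l.foldl gcdAcc 0
def winG (nums : List Int) (a len : Nat) : Nat := natFold ((nums.drop a).take len)

-- canonical greedy count of disjoint gcd≥2 windows of length L starting from i
def gc (nums : List Int) (L i : Int) : Int :=
  if h : i + L ≤ (nums.length : Int) ∧ 1 ≤ L ∧ 0 ≤ i then
    (if 2 ≤ (winG nums i.toNat L.toNat : Int) then 1 + gc nums L (i + L) else gc nums L (i + 1))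
  else 0
termination_by ((nums.length : Int) + 1 - i).toNat
decreasing_by all_goals omega

def ofold (t : List Int) (res : Option Int) (idxs : List Int) : Option Int :=
  idxs.foldl (fun a j => some (segCombine a (tGet t j))) res

-- parent-node property of the built tree, over Int indices
def TreeProp (t : List Int) (n : Nat) : Prop :=
  ∀ j : Int, 1 ≤ j → j < (n:Int) → tGet t j = pyGcd (tGet t (2*j)) (tGet t (2*j+1))

theorem natAbs_pyGcd (a b : Int) : (pyGcd a b).natAbs = Nat.gcd a.natAbs b.natAbs := by
  simp [pyGcd, Int.gcd]

theorem pyGcd_def (a b : Int) : pyGcd a b = ((Nat.gcd a.natAbs b.natAbs : Nat) : Int) := by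
  simp [pyGcd, Int.gcd]

theorem pyGcd_comm (a b : Int) : pyGcd a b = pyGcd b a := by
  simp [pyGcd_def, Nat.gcd_comm]

theorem pyGcd_right_comm (v x y : Int) : pyGcd (pyGcd v x) y = pyGcd (pyGcd v y) x := by
  simp [pyGcd_def, Nat.gcd_assoc]
  rw [Nat.gcd_comm x.natAbs y.natAbs]

theorem pyGcd_assoc' (v a b : Int) : pyGcd (pyGcd v a) b = pyGcd v (pyGcd a b) := by
  simp [pyGcd_def, Nat.gcd_assoc]

theorem segCombine_comm (res : Option Int) (x y : Int) :
    pyGcd (segCombine res y) x = pyGcd (segCombine res x) y := by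
  cases res with
  | none => exact pyGcd_comm _ _ |>.trans (by simp [segCombine])
  | some v => exact pyGcd_right_comm v y x

theorem ofold_cons (t : List Int) (res : Option Int) (j : Int) (js : List Int) :
    ofold t res (j :: js) = ofold t (some (segCombine res (tGet t j))) js := rfl

theorem ofold_nil (t : List Int) (res : Option Int) : ofold t res [] = res := rfl

theorem ofold_append (t : List Int) (res : Option Int) (xs ys : List Int) :
    ofold t res (xs ++ ys) = ofold t (ofold t res xs) ys := by
  simp [ofold, List.foldl_append]

theorem ofold_pull (t : List Int) (xs : List Int) (res : Option Int) (y : Int) :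
    ofold t (some (segCombine res y)) xs = some (segCombine (ofold t res xs) y) := by
  induction xs generalizing res with
  | nil => simp [ofold, segCombine]
  | cons j js ih =>
    show ofold t (some (segCombine (some (segCombine res y)) (tGet t j))) js = _
    have : segCombine (some (segCombine res y)) (tGet t j)
        = segCombine (some (segCombine res (tGet t j))) y := by
      simp [segCombine]; exact segCombine_comm res (tGet t j) y
    rw [this, ih]
    rfl

theorem shift1 (a : Int) : a >>> (1:Nat) = a / 2 := by
  have := Int.shiftRight_eq_div_pow a 1
  simpa using this

theorem shiftl_pow (k : Nat) : ((1:Int) <<< k) = 2^k := by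
  simpa using Int.shiftLeft_eq 1 k

theorem band1 (a : Int) : PySem.Int.band a 1 = a % 2 := by
  have h1 := PySem.Int.band_one a
  have h2 := PySem.Int.mod_eq_emod_of_pos (a := a) (b := 2) (by omega)
  omega

theorem pairs (t : List Int) (n : Nat) (hP : TreeProp t n) :
    ∀ (k : Nat) (p q : Int) (res : Option Int), 1 ≤ p → q < (n:Int) → (q+1-p).toNat ≤ k →
    ofold t res (PySem.List.pyRange p (q+1) 1) = ofold t res (PySem.List.pyRange (2*p) (2*q+2) 1) := by
  intro k
  induction k with
  | zero =>
    intro p q res hp hq hk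
    rw [PySem.List.pyRange_one_eq_nil (by omega), PySem.List.pyRange_one_eq_nil (by omega)]
  | succ k ih =>
    intro p q res hp hq hk
    by_cases hpq : q + 1 ≤ p
    · rw [PySem.List.pyRange_one_eq_nil (by omega), PySem.List.pyRange_one_eq_nil (by omega)]
    · rw [PySem.List.pyRange_one_cons (by omega : p < q+1)]
      rw [PySem.List.pyRange_one_cons (by omega : 2*p < 2*q+2)]
      rw [show (2*p+1 : Int) = 2*p+1 from rfl]
      rw [PySem.List.pyRange_one_cons (by omega : 2*p+1 < 2*q+2)]
      rw [ofold_cons, ofold_cons, ofold_cons]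
      have hkey : segCombine res (tGet t p)
          = segCombine (some (segCombine res (tGet t (2*p)))) (tGet t (2*p+1)) := by
        have hp' := hP p hp (by omega)
        cases res with
        | none => simpa [segCombine] using hp'
        | some v => simp only [segCombine]; rw [hp', ← pyGcd_assoc']
      rw [← hkey]
      have e1 : (2*p+1+1 : Int) = 2*(p+1) := by ring
      rw [e1]
      exact ih (p+1) q _ (by omega) hq (by omega)

theorem qloop_eq (t : List Int) (n : Nat) (hP : TreeProp t n) :
    ∀ (fuel : Nat) (l r : Int) (res : Option Int), 1 ≤ l → r < 2*(n:Int) → r < (fuel:Int) →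
    segQLoop t fuel l r res = ofold t res (PySem.List.pyRange l (r+1) 1) := by
  intro fuel
  induction fuel with
  | zero =>
    intro l r res hl _ hf
    rw [PySem.List.pyRange_one_eq_nil (by omega : r + 1 ≤ l)]
    rfl
  | succ fuel ih =>
    intro l r res hl hr hf
    by_cases hlr : l ≤ r
    · have hstep : segQLoop t (fuel+1) l r res
          = (if PySem.Int.band l 1 ≠ 0
            then (if PySem.Int.band r 1 = 0
              then segQLoop t fuel ((l+1) >>> (1:Nat)) ((r-1) >>> (1:Nat)) (some (segCombine (some (segCombine res (tGet t l))) (tGet t r)))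
              else segQLoop t fuel ((l+1) >>> (1:Nat)) (r >>> (1:Nat)) (some (segCombine res (tGet t l))))
            else (if PySem.Int.band r 1 = 0
              then segQLoop t fuel (l >>> (1:Nat)) ((r-1) >>> (1:Nat)) (some (segCombine res (tGet t r)))
              else segQLoop t fuel (l >>> (1:Nat)) (r >>> (1:Nat)) res)) := by
        show (if l ≤ r then _ else res) = _
        rw [if_pos hlr]
        split_ifs with hbl hbr hbr' <;> rfl
      rw [hstep]
      have hfu : r ≤ (fuel:Int) := by omega
      have hr1 : 1 ≤ r := by omega
      have hle : l % 2 = 0 ∨ l % 2 = 1 := by omega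
      have hre : r % 2 = 0 ∨ r % 2 = 1 := by omega
      rcases hle with hl0 | hl1 <;> rcases hre with hr0 | hr1'
      -- case l even, r even
      · rw [if_neg (by rw [band1]; omega), if_pos (by rw [band1]; omega)]
        rw [shift1, shift1]
        rw [ih (l/2) ((r-1)/2) _ (by omega) (by omega) (by omega)]
        have hpair := pairs t n hP ((r-1)/2+1-l/2).toNat (l/2) ((r-1)/2)
          (some (segCombine res (tGet t r))) (by omega) (by omega) (le_refl _)
        rw [hpair]
        have e1 : (2*(l/2) : Int) = l := by omega
        have e2 : (2*((r-1)/2)+2 : Int) = r := by omega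
        rw [e1, e2]
        rw [ofold_pull]
        have edec : PySem.List.pyRange l (r+1) 1 = PySem.List.pyRange l r 1 ++ [r] := by
          have := PySem.List.pyRange_one_succ_right (a := l) (b := r) (by omega)
          simpa using this
        rw [edec, ofold_append]
        rfl
      -- case l even, r odd
      · rw [if_neg (by rw [band1]; omega), if_neg (by rw [band1]; omega)]
        rw [shift1, shift1]
        rw [ih (l/2) (r/2) _ (by omega) (by omega) (by omega)]
        have hpair := pairs t n hP (r/2+1-l/2).toNat (l/2) (r/2) res (by omega) (by omega) (le_refl _)
        rw [hpair]
        have e1 : (2*(l/2) : Int) = l := by omega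
        have e2 : (2*(r/2)+2 : Int) = r+1 := by omega
        rw [e1, e2]
      -- case l odd, r even
      · rw [if_pos (by rw [band1]; omega), if_pos (by rw [band1]; omega)]
        rw [shift1, shift1]
        rw [ih ((l+1)/2) ((r-1)/2) _ (by omega) (by omega) (by omega)]
        have hpair := pairs t n hP ((r-1)/2+1-(l+1)/2).toNat ((l+1)/2) ((r-1)/2)
          (some (segCombine (some (segCombine res (tGet t l))) (tGet t r))) (by omega) (by omega) (le_refl _)
        rw [hpair]
        have e1 : (2*((l+1)/2) : Int) = l+1 := by omega
        have e2 : (2*((r-1)/2)+2 : Int) = r := by omega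
        rw [e1, e2]
        rw [ofold_pull]
        rw [PySem.List.pyRange_one_cons (by omega : l < r+1), ofold_cons]
        have edec : PySem.List.pyRange (l+1) (r+1) 1 = PySem.List.pyRange (l+1) r 1 ++ [r] := by
          have := PySem.List.pyRange_one_succ_right (a := l+1) (b := r) (by omega)
          simpa using this
        rw [edec, ofold_append]
        rfl
      -- case l odd, r odd
      · rw [if_pos (by rw [band1]; omega), if_neg (by rw [band1]; omega)]
        rw [shift1, shift1]
        rw [ih ((l+1)/2) (r/2) _ (by omega) (by omega) (by omega)]
        have hpair := pairs t n hP (r/2+1-(l+1)/2).toNat ((l+1)/2) (r/2)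
          (some (segCombine res (tGet t l))) (by omega) (by omega) (le_refl _)
        rw [hpair]
        have e1 : (2*((l+1)/2) : Int) = l+1 := by omega
        have e2 : (2*(r/2)+2 : Int) = r+1 := by omega
        rw [e1, e2]
        rw [PySem.List.pyRange_one_cons (by omega : l < r+1), ofold_cons]
    · rw [PySem.List.pyRange_one_eq_nil (by omega : r + 1 ≤ l)]
      show (if l ≤ r then _ else res) = res
      rw [if_neg hlr]

theorem setTake (t : List Int) (a : Nat) (x : Int) (h : a < t.length) :
    (t.take a ++ x :: t.drop (a+1)).take (a+1) = t.take a ++ [x] := by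
  rw [List.take_append]
  have h1 : List.take (a+1) (List.take a t) = List.take a t := by
    rw [List.take_take]; congr 1; omega
  have h2 : a + 1 - (t.take a).length = 1 := by simp [List.length_take]; omega
  rw [h1, h2]
  rfl

theorem setDrop (t : List Int) (a k : Nat) (x : Int) (h : a < t.length) :
    (t.take a ++ x :: t.drop (a+1)).drop (a+1+k) = t.drop (a+1+k) := by
  rw [List.drop_append]
  have h1 : List.drop (a+1+k) (List.take a t) = [] := by
    apply List.drop_eq_nil_of_le; simp [List.length_take]; omega
  have h2 : (a+1+k) - (t.take a).length = 1 + k := by simp [List.length_take]; omega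
  rw [h1, h2]
  show List.drop (1+k) (x :: t.drop (a+1)) = _
  rw [Nat.add_comm 1 k]
  show List.drop k (t.drop (a+1)) = _
  rw [List.drop_drop]

theorem zipSet (xs : List Int) : ∀ (a : Nat) (t : List Int), a + xs.length ≤ t.length →
    (List.zip (PySem.List.pyRange (a:Int) ((a:Int) + (xs.length:Int)) 1) xs).foldl
      (fun t p => PySem.List.pySetD t p.1 p.2) t
    = t.take a ++ xs ++ t.drop (a + xs.length) := by
  induction xs with
  | nil => intro a t h; simp [PySem.List.pyRange_one_eq_nil, List.take_append_drop]
  | cons x xs ih =>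
    intro a t h
    have hlt : (a:Int) < (a:Int) + ((x::xs).length:Int) := by simp only [List.length_cons]; omega
    have hcons : PySem.List.pyRange (a:Int) ((a:Int) + ((x::xs).length:Int)) 1
        = (a:Int) :: PySem.List.pyRange ((a:Int)+1) ((a:Int) + ((x::xs).length:Int)) 1 :=
      PySem.List.pyRange_one_cons hlt
    rw [hcons]
    show (List.zip _ xs).foldl _ (PySem.List.pySetD t (a:Int) x) = _
    have e1 : ((a:Int)+1) = ((a+1 : Nat):Int) := by push_cast; ring
    have e2 : ((a:Int) + ((x::xs).length:Int)) = ((a+1:Nat):Int) + (xs.length:Int) := by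
      simp; ring
    rw [e1, e2, PySem.List.pySetD_natCast]
    rw [ih (a+1) (t.set a x) (by simp; omega)]
    have hlen : a < t.length := by simp at h; omega
    have hset : t.set a x = t.take a ++ x :: t.drop (a+1) := by
      rw [List.set_eq_take_append_cons_drop, if_pos hlen]
    rw [hset, setTake _ _ _ hlen]
    have hd : a + 1 + xs.length = (a+1) + xs.length := by omega
    rw [setDrop _ _ _ _ hlen]
    simp
    omega

theorem segInit_eq (nums : List Int) :
    segInit nums = List.replicate nums.length 0 ++ nums := by
  unfold segInit
  have e : (2 * (nums.length:Int)) = ((nums.length:Nat):Int) + ((nums.length:Nat):Int) := by ring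
  rw [e]
  rw [zipSet nums nums.length (List.replicate (2*nums.length) 0) (by simp; omega)]
  simp [List.take_replicate, List.drop_replicate]
  have h1 : min nums.length (2 * nums.length) = nums.length := by omega
  have h2 : 2 * nums.length - (nums.length + nums.length) = 0 := by omega
  rw [h1, h2]
  simp


theorem getD_segBuild_gt (i : Nat) : ∀ (t : List Int) (j : Nat), i < j →
    (segBuild t i).getD j 0 = t.getD j 0 := by
  induction i with
  | zero => intro t j _; rfl
  | succ i ih =>
    intro t j hj
    rw [segBuild, ih _ _ (by omega)]
    have : ((i:Int)+1) = ((i+1 : Nat) : Int) := by push_cast; ring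
    rw [this, PySem.List.pySetD_natCast]
    rw [List.getD_eq_getElem?_getD, List.getD_eq_getElem?_getD, List.getElem?_set_ne (by omega)]

theorem tcast (t : List Int) (m : Nat) : tGet t (m : Int) = t.getD m 0 := by
  simp [tGet]

theorem build_nodes (n : Nat) : ∀ (i : Nat) (t : List Int), t.length = 2*n → i < n →
    ∀ j : Nat, 1 ≤ j → j ≤ i →
    (segBuild t i).getD j 0 = pyGcd ((segBuild t i).getD (2*j) 0) ((segBuild t i).getD (2*j+1) 0) := by
  intro i
  induction i with
  | zero => intro t _ _ j h1 h2; omega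
  | succ i ih =>
    intro t hlen hin j h1 h2
    rw [segBuild]
    set g := pyGcd (tGet t (2*((i:Int)+1))) (tGet t (2*((i:Int)+1)+1)) with hg
    set t' := PySem.List.pySetD t ((i:Int)+1) g with ht'
    have hlen' : t'.length = 2*n := by
      rw [ht']
      have : ((i:Int)+1) = ((i+1 : Nat) : Int) := by push_cast; ring
      rw [this, PySem.List.pySetD_natCast]
      simp [hlen]
    by_cases hji : j ≤ i
    · exact ih t' hlen' (by omega) j h1 hji
    · have hj : j = i + 1 := by omega
      subst hj
      have e1 : (segBuild t' i).getD (i+1) 0 = t'.getD (i+1) 0 := getD_segBuild_gt i t' (i+1) (by omega)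
      have e2 : (segBuild t' i).getD (2*(i+1)) 0 = t'.getD (2*(i+1)) 0 := getD_segBuild_gt i t' _ (by omega)
      have e3 : (segBuild t' i).getD (2*(i+1)+1) 0 = t'.getD (2*(i+1)+1) 0 := getD_segBuild_gt i t' _ (by omega)
      rw [e1, e2, e3]
      have hc : ((i:Int)+1) = ((i+1 : Nat) : Int) := by push_cast; ring
      have ht'' : t' = t.set (i+1) g := by rw [ht', hc, PySem.List.pySetD_natCast]
      have hv : t'.getD (i+1) 0 = g := by
        rw [ht'', List.getD_eq_getElem?_getD, List.getElem?_set_self (by omega)]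
        rfl
      have hv2 : t'.getD (2*(i+1)) 0 = t.getD (2*(i+1)) 0 := by
        rw [ht'', List.getD_eq_getElem?_getD, List.getElem?_set_ne (by omega), ← List.getD_eq_getElem?_getD]
      have hv3 : t'.getD (2*(i+1)+1) 0 = t.getD (2*(i+1)+1) 0 := by
        rw [ht'', List.getD_eq_getElem?_getD, List.getElem?_set_ne (by omega), ← List.getD_eq_getElem?_getD]
      rw [hv, hv2, hv3, hg]
      have c2 : (2*((i:Int)+1)) = ((2*(i+1) : Nat) : Int) := by push_cast; ring
      rw [c2, tcast]
      have c3 : ((2*(i+1) : Nat) : Int) + 1 = ((2*(i+1)+1 : Nat) : Int) := by push_cast; ring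
      rw [c3, tcast]

-- the built tree: leaves and parent property
theorem tree_leaf (nums : List Int) (j : Nat) (hj : j < nums.length) :
    (segBuild (segInit nums) (nums.length - 1)).getD (nums.length + j) 0 = nums.getD j 0 := by
  rw [getD_segBuild_gt _ _ _ (by omega), segInit_eq]
  rw [List.getD_eq_getElem?_getD, List.getD_eq_getElem?_getD]
  rw [List.getElem?_append_right (by simp)]
  simp

theorem tree_prop (nums : List Int) : TreeProp (segBuild (segInit nums) (nums.length - 1)) nums.length := by
  rw [segInit_eq]
  have hInit : (List.replicate nums.length (0:Int) ++ nums).length = 2*nums.length := by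
    simp; ring
  intro j h1 h2
  have hn : 2 ≤ nums.length := by omega
  have hj : j = ((j.toNat : Nat) : Int) := by omega
  rw [hj]
  have c2 : (2*((j.toNat : Nat) : Int)) = ((2*j.toNat : Nat) : Int) := by push_cast; ring
  rw [c2]
  have c3 : ((2*j.toNat : Nat) : Int) + 1 = ((2*j.toNat+1 : Nat) : Int) := by push_cast; ring
  rw [c3, tcast, tcast, tcast]
  exact build_nodes nums.length (nums.length - 1) ((List.replicate nums.length (0:Int) ++ nums)) hInit (by omega) j.toNat (by omega) (by omega)

theorem castFold (nums : List Int) :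
    ∀ (len c : Nat) (w : Nat), c + len ≤ nums.length →
    ofold (segBuild (segInit nums) (nums.length - 1)) (some ((w:Nat):Int))
      (PySem.List.pyRange ((nums.length:Int)+c) ((nums.length:Int)+c+len) 1)
    = some (((((nums.drop c).take len).foldl gcdAcc w : Nat)) : Int) := by
  intro len
  induction len with
  | zero =>
    intro c w _
    rw [show ((nums.length:Int)+c+(0:Nat)) = (nums.length:Int)+c by push_cast; ring]
    rw [PySem.List.pyRange_one_eq_nil (by omega), ofold_nil]
    simp
  | succ len ih =>
    intro c w hcl
    have hc : c < nums.length := by omega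
    rw [PySem.List.pyRange_one_cons (by push_cast; omega), ofold_cons]
    have hleaf : tGet (segBuild (segInit nums) (nums.length - 1)) ((nums.length:Int)+c)
        = nums.getD c 0 := by
      rw [show ((nums.length:Int)+c) = ((nums.length + c : Nat) : Int) by push_cast; ring, tcast]
      exact tree_leaf nums c hc
    have hcomb : segCombine (some ((w:Nat):Int)) (nums.getD c 0)
        = ((gcdAcc w (nums.getD c 0) : Nat) : Int) := by
      simp [segCombine, pyGcd_def, gcdAcc]
    rw [hleaf, hcomb]
    have e1 : ((nums.length:Int)+c+1) = (nums.length:Int)+((c+1:Nat):Int) := by push_cast; ring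
    have e2 : ((nums.length:Int)+c+((len+1:Nat):Int)) = (nums.length:Int)+((c+1:Nat):Int)+(len:Int) := by
      push_cast; ring
    rw [e1, e2, ih (c+1) (gcdAcc w (nums.getD c 0)) (by omega)]
    congr 2
    have hdrop : nums.drop c = nums.getD c 0 :: nums.drop (c+1) := by
      rw [List.drop_eq_getElem_cons hc]
      congr 1
      rw [List.getD_eq_getElem?_getD, List.getElem?_eq_getElem hc]
      rfl
    rw [hdrop]
    rfl

theorem segQuery_eq (nums : List Int) (a b : Int) (ha : 0 ≤ a) (hab : a < b) (hb : b < (nums.length:Int)) :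
    segQuery (segBuild (segInit nums) (nums.length - 1)) nums.length a b
      = some ((winG nums a.toNat (b+1-a).toNat : Nat) : Int) := by
  set T := segBuild (segInit nums) (nums.length - 1) with hT
  set n := nums.length with hn
  have hn2 : 2 ≤ (n:Int) := by omega
  show segQLoop T (2*n+2) (a + n) (b + n) none = _
  rw [qloop_eq T n (tree_prop nums) (2*n+2) (a+(n:Int)) (b+(n:Int)) none (by omega) (by omega) (by push_cast; omega)]
  rw [PySem.List.pyRange_one_cons (by omega), ofold_cons]
  rw [PySem.List.pyRange_one_cons (by omega), ofold_cons]
  have hleaf : ∀ j : Nat, j < n → tGet T ((n:Int)+j) = nums.getD j 0 := by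
    intro j hj
    rw [show ((n:Int)+j) = ((n + j : Nat) : Int) by push_cast; ring, tcast]
    exact tree_leaf nums j hj
  set aN := a.toNat with haN
  set bN := b.toNat with hbN
  have ha' : a = (aN:Int) := by omega
  have hb' : b = (bN:Int) := by omega
  have haN2 : aN + 2 ≤ n := by omega
  have e0 : a + (n:Int) = (n:Int) + (aN:Int) := by omega
  have e1 : (n:Int) + (aN:Int) + 1 = (n:Int) + ((aN+1:Nat):Int) := by push_cast; omega
  have e2 : (n:Int) + ((aN+1:Nat):Int) + 1 = (n:Int) + ((aN+2:Nat):Int) := by push_cast; omega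
  have e3 : b + (n:Int) + 1 = (n:Int) + ((aN+2:Nat):Int) + (((bN-aN-1 : Nat)):Int) := by
    push_cast; omega
  rw [e0, hleaf aN (by omega)]
  rw [e1, hleaf (aN+1) (by omega)]
  rw [e2, e3]
  have hcomb : segCombine (some (segCombine none (nums.getD aN 0))) (nums.getD (aN+1) 0)
      = ((gcdAcc (gcdAcc 0 (nums.getD aN 0)) (nums.getD (aN+1) 0) : Nat) : Int) := by
    simp [segCombine, pyGcd_def, gcdAcc]
  rw [hcomb]
  rw [castFold nums (bN-aN-1) (aN+2) _ (by omega)]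
  congr 2
  unfold winG natFold
  have hbt : (b+1-a).toNat = bN + 1 - aN := by omega
  rw [hbt]
  have hd1 : nums.drop aN = nums.getD aN 0 :: nums.drop (aN+1) := by
    rw [List.drop_eq_getElem_cons (by omega)]
    congr 1
    rw [List.getD_eq_getElem?_getD, List.getElem?_eq_getElem (by omega : aN < nums.length)]
    rfl
  have hd2 : nums.drop (aN+1) = nums.getD (aN+1) 0 :: nums.drop (aN+2) := by
    rw [List.drop_eq_getElem_cons (by omega)]
    congr 1
    rw [List.getD_eq_getElem?_getD, List.getElem?_eq_getElem (by omega : aN+1 < nums.length)]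
    rfl
  rw [hd1, hd2]
  have ht : bN + 1 - aN = (bN - aN - 1) + 1 + 1 := by omega
  rw [ht]
  rfl

-- ===== sparse table side =====

theorem natFold_from (l : List Int) : ∀ g : Nat, l.foldl gcdAcc g = Nat.gcd g (natFold l) := by
  induction l with
  | nil => intro g; simp [natFold]
  | cons x xs ih =>
    intro g
    show xs.foldl gcdAcc (gcdAcc g x) = _
    have h1 : natFold (x :: xs) = xs.foldl gcdAcc (gcdAcc 0 x) := rfl
    rw [ih, h1, ih (gcdAcc 0 x)]
    simp [gcdAcc, Nat.gcd_assoc]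

theorem natFold_append (xs ys : List Int) : natFold (xs ++ ys) = Nat.gcd (natFold xs) (natFold ys) := by
  unfold natFold
  rw [List.foldl_append, natFold_from]
  rfl

theorem winG_split (nums : List Int) (a m len : Nat) (h : m ≤ len) :
    winG nums a len = Nat.gcd (winG nums a m) (winG nums (a+m) (len-m)) := by
  unfold winG
  rw [← natFold_append]
  congr 1
  rw [← List.drop_drop]
  have : len = m + (len - m) := by omega
  rw [this, List.take_add]
  congr 2
  omega

theorem gcd_mid (p q r : Nat) : Nat.gcd (Nat.gcd p q) (Nat.gcd q r) = Nat.gcd p (Nat.gcd q r) := by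
  rw [Nat.gcd_assoc, ← Nat.gcd_assoc q q r, Nat.gcd_self]

theorem winG_overlap (nums : List Int) (a w L : Nat) (h1 : w ≤ L) (h2 : L ≤ 2*w) :
    Nat.gcd (winG nums a w) (winG nums (a+L-w) w) = winG nums a L := by
  have e1 : winG nums a w = Nat.gcd (winG nums a (L-w)) (winG nums (a+(L-w)) (w-(L-w))) :=
    winG_split nums a (L-w) w (by omega)
  have e2 : winG nums (a+L-w) w
      = Nat.gcd (winG nums (a+L-w) (w-(L-w))) (winG nums ((a+L-w)+(w-(L-w))) (w-(w-(L-w)))) :=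
    winG_split nums (a+L-w) (w-(L-w)) w (by omega)
  have e3 : winG nums a L = Nat.gcd (winG nums a (L-w)) (winG nums (a+(L-w)) (L-(L-w))) :=
    winG_split nums a (L-w) L (by omega)
  have e4 : winG nums (a+(L-w)) (L-(L-w))
      = Nat.gcd (winG nums (a+(L-w)) (w-(L-w))) (winG nums ((a+(L-w))+(w-(L-w))) ((L-(L-w))-(w-(L-w)))) :=
    winG_split nums (a+(L-w)) (w-(L-w)) (L-(L-w)) (by omega)
  have h4 : a + L - w = a + (L-w) := by omega
  have h5 : (a+(L-w))+(w-(L-w)) = a + w := by omega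
  have h6 : w - (w - (L-w)) = L - w := by omega
  have h7 : (L-(L-w))-(w-(L-w)) = L - w := by omega
  rw [e1, e2, e3, e4, h4, h5, h6, h7]
  exact gcd_mid _ _ _

def stInv (nums : List Int) (acc : List (List Int)) (K : Nat) : Prop :=
  acc.length = K ∧ ∀ k, k < K →
    (acc.getD k []).length = nums.length + 1 - 2^k ∧
    ∀ i, i < (acc.getD k []).length → ((acc.getD k []).getD i 0).natAbs = winG nums i (2^k)

theorem stLoop_spec (nums : List Int) :
    ∀ (fuel : Nat) (acc : List (List Int)) (K : Nat), stInv nums acc K → 1 ≤ K →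
    ((nums.length:Int) < 2^(K-1+fuel)) →
    ∃ K', 1 ≤ K' ∧ stInv nums (stLoop nums.length fuel acc ((2^(K-1) : Nat) : Int)) K' ∧
      (nums.length:Int) < 2^K' := by
  intro fuel
  induction fuel with
  | zero =>
    intro acc K hInv hK hbound
    exact ⟨K, hK, hInv, by
      have h1 : (2:Int)^(K-1) ≤ 2^K := by
        apply pow_le_pow_right₀ (by omega) (by omega)
      simp only [Nat.add_zero] at hbound
      omega⟩
  | succ fuel ih =>
    intro acc K hInv hK hbound
    by_cases hcond : 2*((2^(K-1):Nat):Int) ≤ (nums.length:Nat)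
    · rw [stLoop, if_pos hcond]
      -- the appended row
      have hlen : acc.length = K := hInv.1
      have hne : acc ≠ [] := by intro h; rw [h] at hlen; simp at hlen; omega
      have hprev : (PySem.List.pyGet? acc (-1)).getD [] = acc.getD (K-1) [] := by
        rw [PySem.List.pyGet?_neg_one]
        rw [List.getLast?_eq_getElem?]
        rw [List.getD_eq_getElem?_getD, hlen]
      have hKspec := hInv.2 (K-1) (by omega)
      rw [← hprev] at hKspec
      set prev := (PySem.List.pyGet? acc (-1)).getD [] with hprevdef
      have hplen : prev.length = nums.length + 1 - 2^(K-1) := hKspec.1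
      have hm : 2^K ≤ nums.length := by
        have : ((2*2^(K-1) : Nat) : Int) ≤ (nums.length:Int) := by push_cast; push_cast at hcond; omega
        have h2 : 2*2^(K-1) = 2^K := by
          have hKe : K - 1 + 1 = K := by omega
          have hp : (2:Nat)^(K-1+1) = 2^(K-1)*2 := Nat.pow_succ 2 (K-1)
          rw [hKe] at hp
          omega
        omega
      set p := (2^(K-1) : Nat) with hpdef
      have hp2K : 2*p = 2^K := by
        have hKe : K - 1 + 1 = K := by omega
        have hpp : (2:Nat)^(K-1+1) = 2^(K-1)*2 := Nat.pow_succ 2 (K-1)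
        rw [hKe] at hpp
        omega
      have hp1 : 1 ≤ p := Nat.one_le_two_pow
      set M := nums.length + 1 - 2^K with hMdef
      set row := (PySem.List.pyRange 0 ((prev.length : Int) - ((p:Nat):Int)) 1).map
        (fun i => pyGcd (PySem.List.pyGetD prev i 0) (PySem.List.pyGetD prev (i + ((p:Nat):Int)) 0)) with hrowdef
      have hrange : ((prev.length : Int) - ((p:Nat):Int)) = ((M:Nat):Int) := by
        rw [hplen]; omega
      have hrlen : row.length = M := by
        rw [hrowdef, List.length_map, hrange, PySem.List.length_pyRange_one]
        omega
      have hrentry : ∀ i, i < M → (row.getD i 0).natAbs = winG nums i (2^K) := by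
        intro i hi
        have hgd : row.getD i 0
            = pyGcd (PySem.List.pyGetD prev ((i:Nat):Int) 0) (PySem.List.pyGetD prev (((i:Nat):Int) + ((p:Nat):Int)) 0) := by
          rw [hrowdef, hrange, PySem.List.pyRange_one]
          simp only [Int.sub_zero, List.map_map]
          rw [List.getD_eq_getElem?_getD]
          rw [List.getElem?_map]
          rw [List.getElem?_range (by omega)]
          simp
        rw [hgd]
        have hc1 : PySem.List.pyGetD prev ((i:Nat):Int) 0 = prev.getD i 0 :=
          PySem.List.pyGetD_natCast prev i 0
        have hc2 : PySem.List.pyGetD prev (((i:Nat):Int) + ((p:Nat):Int)) 0 = prev.getD (i+p) 0 := by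
          rw [show ((i:Nat):Int) + ((p:Nat):Int) = ((i+p : Nat):Int) by push_cast; ring]
          exact PySem.List.pyGetD_natCast prev (i+p) 0
        rw [hc1, hc2, natAbs_pyGcd]
        rw [hKspec.2 i (by omega), hKspec.2 (i+p) (by omega)]
        have hsplit := winG_split nums i p (2^K) (by omega)
        rw [show (2:Nat)^K - p = p by omega] at hsplit
        exact hsplit.symm
      have hInv' : stInv nums (acc ++ [row]) (K+1) := by
        refine ⟨by simp [hlen], ?_⟩
        intro k hk
        by_cases hkK : k < K
        · have hget : (acc ++ [row]).getD k [] = acc.getD k [] := by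
            rw [List.getD_eq_getElem?_getD, List.getD_eq_getElem?_getD,
              List.getElem?_append_left (by omega)]
          rw [hget]
          exact hInv.2 k hkK
        · have hkEq : k = K := by omega
          subst hkEq
          have hget : (acc ++ [row]).getD k [] = row := by
            rw [List.getD_eq_getElem?_getD, List.getElem?_append_right (by omega), hlen]
            simp
          rw [hget, hrlen]
          exact ⟨by omega, hrentry⟩
      have hcast : (2:Int)*((p:Nat):Int) = ((2^(K+1-1) : Nat):Int) := by
        rw [show K+1-1 = K by omega]
        exact_mod_cast hp2K
      rw [hcast]
      have hbound' : (nums.length:Int) < 2^(K+1-1+fuel) := by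
        rw [show K+1-1+fuel = K-1+(fuel+1) by omega]
        exact hbound
      obtain ⟨K', h1, h2, h3⟩ := ih (acc ++ [row]) (K+1) hInv' (by omega) hbound'
      exact ⟨K', h1, h2, h3⟩
    · rw [stLoop, if_neg hcond]
      refine ⟨K, hK, hInv, ?_⟩
      have hKe : K - 1 + 1 = K := by omega
      have hp : (2:Nat)^(K-1+1) = 2^(K-1)*2 := Nat.pow_succ 2 (K-1)
      rw [hKe] at hp
      have hp2 : (2:Nat) * 2^(K-1) = 2^K := by omega
      have h2 : (2:Int)*((2^(K-1):Nat):Int) = ((2^K : Nat):Int) := by exact_mod_cast hp2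
      have h3 : ((2^K : Nat):Int) = (2:Int)^K := by push_cast; ring
      omega

theorem stBuild_spec (nums : List Int) :
    ∃ K', 1 ≤ K' ∧ stInv nums (stBuild nums) K' ∧ (nums.length:Int) < 2^K' := by
  have hbase : stInv nums [nums] 1 := by
    refine ⟨rfl, ?_⟩
    intro k hk
    have hk0 : k = 0 := by omega
    subst hk0
    refine ⟨by simp, ?_⟩
    intro i hi
    simp only [List.getD_cons_zero] at hi ⊢
    have hi' : i < nums.length := by simpa using hi
    have hdrop : nums.drop i = nums[i] :: nums.drop (i+1) := List.drop_eq_getElem_cons hi'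
    have hgd : nums.getD i 0 = nums[i] := by
      rw [List.getD_eq_getElem?_getD, List.getElem?_eq_getElem hi']; rfl
    unfold winG natFold
    rw [pow_zero, hdrop, hgd]
    show nums[i].natAbs = List.foldl gcdAcc 0 [nums[i]]
    simp [gcdAcc]
  have hpow : (nums.length:Int) < 2^(1-1+(nums.length+1)) := by
    have h1 : nums.length < 2^(nums.length) := Nat.lt_two_pow_self
    have h2 : (2:Nat)^nums.length ≤ 2^(nums.length+1) := by
      apply Nat.pow_le_pow_right (by omega) (by omega)
    have : nums.length < 2^(nums.length+1) := by omega
    rw [show 1-1+(nums.length+1) = nums.length+1 by omega]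
    exact_mod_cast this
  have := stLoop_spec nums (nums.length+1) [nums] 1 hbase (by omega) hpow
  rw [show ((2^(1-1) : Nat) : Int) = 1 by norm_num] at this
  exact this

theorem stQuery_eq (nums : List Int) (a b : Int) (ha : 0 ≤ a) (hab : a < b) (hb : b < (nums.length:Int)) :
    stQuery (stBuild nums) a b = ((winG nums a.toNat (b+1-a).toNat : Nat) : Int) := by
  obtain ⟨K, hK1, ⟨hlen, hspec⟩, hKbound⟩ := stBuild_spec nums
  set n := nums.length with hn
  set L := (b - a + 1) with hL
  have hL2 : 2 ≤ L := by omega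
  have hLn : L ≤ (n:Int) := by omega
  set k := PySem.Int.bitLength L - 1 with hk
  have hLne : L ≠ 0 := by omega
  have hbl_lo := PySem.Int.two_pow_bitLength_le L hLne
  have hbl_hi := PySem.Int.lt_two_pow_bitLength L
  have hLabs : L.natAbs = L.toNat := by omega
  have hbl2 : 2 ≤ PySem.Int.bitLength L := by
    by_contra h
    have hble : PySem.Int.bitLength L ≤ 1 := by omega
    have : L.natAbs < 2^(PySem.Int.bitLength L) := hbl_hi
    have h2 : (2:Nat)^(PySem.Int.bitLength L) ≤ 2^1 := Nat.pow_le_pow_right (by omega) hble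
    omega
  have hklo : 2^k ≤ L.toNat := by rw [hk]; rw [hLabs] at hbl_lo; exact hbl_lo
  have hkhi : L.toNat < 2^(k+1) := by
    rw [hk, show PySem.Int.bitLength L - 1 + 1 = PySem.Int.bitLength L by omega]
    rw [hLabs] at hbl_hi; exact hbl_hi
  -- k < K since 2^k ≤ n < 2^K
  have hkK : k < K := by
    by_contra h
    have hKk : K ≤ k := by omega
    have h1 : (2:Nat)^K ≤ 2^k := Nat.pow_le_pow_right (by omega) hKk
    have h2 : (2^k : Nat) ≤ L.toNat := hklo
    have h3 : ((2:Nat)^K : Int) ≤ (L.toNat : Int) := by exact_mod_cast le_trans h1 h2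
    have h4 : ((2:Nat)^K : Int) = (2:Int)^K := by push_cast; ring
    omega
  show pyGcd _ _ = _
  have hrow : (PySem.List.pyGet? (stBuild nums) ((k:Nat):Int)).getD [] = (stBuild nums).getD k [] := by
    rw [PySem.List.pyGet?_natCast]
    rw [List.getD_eq_getElem?_getD]
  rw [hrow]
  set row := (stBuild nums).getD k [] with hrowdef
  obtain ⟨hrlen, hrent⟩ := hspec k hkK
  have hshift : ((1:Int) <<< k) = ((2^k : Nat) : Int) := by
    rw [shiftl_pow]; push_cast; ring
  have ha2 : a = ((a.toNat : Nat) : Int) := by omega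
  have hi1 : PySem.List.pyGetD row a 0 = row.getD a.toNat 0 := by
    rw [ha2]; exact PySem.List.pyGetD_natCast row a.toNat 0
  have hb2 : b - ((1:Int) <<< k) + 1 = (((b+1-a).toNat - 2^k + a.toNat : Nat) : Int) := by
    rw [hshift]; omega
  have hi2 : PySem.List.pyGetD row (b - ((1:Int) <<< k) + 1) 0
      = row.getD ((b+1-a).toNat - 2^k + a.toNat) 0 := by
    rw [hb2]; exact PySem.List.pyGetD_natCast row _ 0
  rw [hi1, hi2]
  have hLt : (b+1-a).toNat = L.toNat := by omega
  have hib1 : a.toNat < row.length := by rw [hrlen]; omega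
  have hib2 : (b+1-a).toNat - 2^k + a.toNat < row.length := by rw [hrlen]; omega
  rw [pyGcd_def, hrent a.toNat hib1, hrent _ hib2]
  rw [hLt]
  have hover := winG_overlap nums a.toNat (2^k) L.toNat hklo (by omega)
  rw [show a.toNat + L.toNat - 2^k = L.toNat - 2^k + a.toNat by omega] at hover
  rw [hover]

-- ===== check equality =====

theorem gc_nonneg (nums : List Int) (L i : Int) : 0 ≤ gc nums L i := by
  induction i using gc.induct nums L with
  | case1 i hc ht ih => rw [gc, dif_pos hc, if_pos ht]; omega
  | case2 i hc ht ih => rw [gc, dif_pos hc, if_neg ht]; exact ih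
  | case3 i hc => rw [gc, dif_neg hc]

theorem checkALoop_eq (nums : List Int) (maxC L : Int) (hL : 2 ≤ L) :
    ∀ (fuel : Nat) (i rem : Int), 0 ≤ i → 0 ≤ rem →
    ((nums.length:Int) - L - i + 2 ≤ (fuel:Int)) →
    checkALoop (segBuild (segInit nums) (nums.length - 1)) nums.length (maxC, L) fuel i rem
      = decide (gc nums L i > rem) := by
  intro fuel
  induction fuel with
  | zero =>
    intro i rem hi hrem hfu
    rw [gc, dif_neg (by simp at hfu; omega)]
    show false = _
    simp
    omega
  | succ fuel ih =>
    intro i rem hi hrem hfu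
    show (if i ≤ (nums.length:Int) - L then _ else false) = _
    by_cases hguard : i ≤ (nums.length:Int) - L
    · rw [if_pos hguard]
      have hq : segQuery (segBuild (segInit nums) (nums.length - 1)) nums.length i (i + L - 1)
          = some ((winG nums i.toNat (i+L-1+1-i).toNat : Nat) : Int) :=
        segQuery_eq nums i (i+L-1) hi (by omega) (by omega)
      rw [show i+L-1+1-i = L by ring] at hq
      rw [hq]
      rw [gc, dif_pos (by omega : i + L ≤ (nums.length:Int) ∧ 1 ≤ L ∧ 0 ≤ i)]
      simp only [Option.getD_some]
      by_cases htest : (2:Int) ≤ ((winG nums i.toNat L.toNat : Nat) : Int)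
      · rw [if_pos (by omega : ((winG nums i.toNat L.toNat : Nat) : Int) ≥ 2), if_pos htest]
        by_cases hrem0 : rem - 1 < 0
        · rw [if_pos hrem0]
          have := gc_nonneg nums L (i + L)
          simp
          omega
        · rw [if_neg hrem0]
          rw [ih (i+L) (rem-1) (by omega) (by omega) (by omega)]
          have := gc_nonneg nums L (i + L)
          simp
          omega
      · rw [if_neg (by omega : ¬ ((winG nums i.toNat L.toNat : Nat) : Int) ≥ 2), if_neg htest]
        exact ih (i+1) rem (by omega) hrem (by omega)
    · rw [if_neg hguard]
      rw [gc, dif_neg (by omega)]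
      simp
      omega

theorem checkBLoop_eq (nums : List Int) (maxC L : Int) (hL : 2 ≤ L) :
    ∀ (fuel : Nat) (i cnt : Int), 0 ≤ i → 1 ≤ fuel →
    ((nums.length:Int) - L - i + 2 ≤ (fuel:Int)) →
    checkBLoop (stBuild nums) nums.length (maxC, L) fuel i cnt
      = decide (cnt + gc nums L i > maxC) := by
  intro fuel
  induction fuel with
  | zero => intro i cnt _ h1 _; omega
  | succ fuel ih =>
    intro i cnt hi _ hfu
    show (if i + L ≤ (nums.length:Int) then _ else _) = _
    by_cases hguard : i + L ≤ (nums.length:Int)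
    · rw [if_pos hguard]
      have hq : stQuery (stBuild nums) i (i + L - 1)
          = ((winG nums i.toNat (i+L-1+1-i).toNat : Nat) : Int) :=
        stQuery_eq nums i (i+L-1) hi (by omega) (by omega)
      rw [show i+L-1+1-i = L by ring] at hq
      rw [hq]
      rw [gc, dif_pos (by omega : i + L ≤ (nums.length:Int) ∧ 1 ≤ L ∧ 0 ≤ i)]
      have hfu1 : 1 ≤ fuel := by omega
      by_cases htest : (2:Int) ≤ ((winG nums i.toNat L.toNat : Nat) : Int)
      · rw [if_pos (by omega : ((winG nums i.toNat L.toNat : Nat) : Int) ≥ 2), if_pos htest]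
        rw [ih (i+L) (cnt+1) (by omega) hfu1 (by omega)]
        simp
        constructor <;> intro h <;> omega
      · rw [if_neg (by omega : ¬ ((winG nums i.toNat L.toNat : Nat) : Int) ≥ 2), if_neg htest]
        exact ih (i+1) cnt (by omega) hfu1 (by omega)
    · rw [if_neg hguard]
      rw [gc, dif_neg (by omega)]
      simp

theorem check_eq (nums : List Int) (maxC L : Int) (hmc : 0 ≤ maxC) (hL : 1 ≤ L) :
    checkA (segBuild (segInit nums) (nums.length - 1)) nums.length maxC L
      = checkB (stBuild nums) nums.length maxC L := by
  unfold checkA checkB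
  by_cases h1 : L = 1
  · rw [if_pos h1, if_pos h1]
  · rw [if_neg h1, if_neg h1]
    have hL2 : 2 ≤ L := by omega
    rw [checkALoop_eq nums maxC L hL2 (nums.length+1) 0 maxC (by omega) hmc (by push_cast; omega)]
    rw [checkBLoop_eq nums maxC L hL2 (nums.length+1) 0 0 (by omega) (by omega) (by push_cast; omega)]
    simp

theorem bs_eq (nums : List Int) (maxC : Int) (hmc : 0 ≤ maxC) :
    ∀ (fuel : Nat) (l r : Int), 1 ≤ l →
    bsA (segBuild (segInit nums) (nums.length - 1)) nums.length maxC fuel l r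
      = bsB (stBuild nums) nums.length maxC fuel l r := by
  intro fuel
  induction fuel with
  | zero => intro l r _; rfl
  | succ fuel ih =>
    intro l r hl
    show (if l < r then _ else l) = (if l < r then _ else l)
    by_cases hlr : l < r
    · rw [if_pos hlr, if_pos hlr]
      have hmid : (l + r) >>> (1:Nat) = (l + r) / 2 := shift1 _
      rw [hmid]
      have hmb : l ≤ (l+r)/2 ∧ (l+r)/2 < r := by omega
      show (if checkA (segBuild (segInit nums) (nums.length - 1)) nums.length maxC ((l+r)/2) = true then
          bsA (segBuild (segInit nums) (nums.length - 1)) nums.length maxC fuel ((l+r)/2 + 1) r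
        else bsA (segBuild (segInit nums) (nums.length - 1)) nums.length maxC fuel l ((l+r)/2))
        = (if checkB (stBuild nums) nums.length maxC ((l+r)/2) = true then
            bsB (stBuild nums) nums.length maxC fuel ((l+r)/2 + 1) r
          else bsB (stBuild nums) nums.length maxC fuel l ((l+r)/2))
      rw [check_eq nums maxC ((l+r)/2) hmc (by omega)]
      by_cases hc : checkB (stBuild nums) nums.length maxC ((l+r)/2) = true
      · rw [if_pos hc, if_pos hc]
        exact ih ((l+r)/2 + 1) r (by omega)
      · rw [if_neg hc, if_neg hc]
        exact ih l ((l+r)/2) hl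
    · rw [if_neg hlr, if_neg hlr]

theorem bs_bounds (nums : List Int) (maxC : Int) :
    ∀ (fuel : Nat) (l r : Int), 1 ≤ l →
    1 ≤ bsA (segBuild (segInit nums) (nums.length - 1)) nums.length maxC fuel l r := by
  intro fuel
  induction fuel with
  | zero => intro l r hl; exact hl
  | succ fuel ih =>
    intro l r hl
    show (if l < r then _ else l) ≥ 1
    by_cases hlr : l < r
    · rw [if_pos hlr]
      have hmid : (l + r) >>> (1:Nat) = (l + r) / 2 := shift1 _
      rw [hmid]
      show (if checkA (segBuild (segInit nums) (nums.length - 1)) nums.length maxC ((l+r)/2) = true then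
          bsA (segBuild (segInit nums) (nums.length - 1)) nums.length maxC fuel ((l+r)/2 + 1) r
        else bsA (segBuild (segInit nums) (nums.length - 1)) nums.length maxC fuel l ((l+r)/2)) ≥ 1
      by_cases hc : checkA (segBuild (segInit nums) (nums.length - 1)) nums.length maxC ((l+r)/2) = true
      · rw [if_pos hc]; exact ih ((l+r)/2 + 1) r (by omega)
      · rw [if_neg hc]; exact ih l ((l+r)/2) hl
    · rw [if_neg hlr]; exact hl

theorem count_ones (nums : List Int) :
    ((nums.map (fun x => if x = 1 then (1:Int) else 0)).sum) = ((PySem.List.count nums 1 : Nat) : Int) := by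
  simp [pysem]
  rw [List.count_eq_countP]
  apply List.countP_congr
  intro x _
  by_cases h : x = 1
  · simp [h]
  · simp [h]

-- ===== VERDICT (by name: the statement is the Claim_ definition above) =====
theorem floordiv_nonpos_of_neg (n d : Int) (hn : 0 ≤ n) (hd : d < 0) :
    PySem.Int.floordiv n d ≤ 0 := by
  have hmod := PySem.Int.floordiv_mul_add_mod n d
  have hb := PySem.Int.mod_neg_bounds (a := n) (b := d) hd
  by_contra h
  have h1 : 1 ≤ PySem.Int.floordiv n d := by omega
  have h2 : PySem.Int.floordiv n d * d ≤ 1 * d :=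
    mul_le_mul_of_nonpos_right h1 (by omega)
  omega

theorem minStable_spec : Claim_equal_minStable := by
  intro nums maxC hDom hPre
  unfold Spec_minStable minStable minStable_alt
  rw [count_ones]
  set T := segBuild (segInit nums) (nums.length - 1) with hT
  set tab := stBuild nums with htab
  set R := PySem.Int.floordiv (nums.length:Int) (maxC+1) with hR
  by_cases hearly : maxC ≥ (nums.length:Int) - ((PySem.List.count nums 1 : Nat) : Int)
  · rw [if_pos hearly, if_pos hearly]
  · rw [if_neg hearly, if_neg hearly]
    show (if checkA T nums.length maxC (bsA T nums.length maxC ((R - 1).toNat + 1) 1 R) = true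
          then bsA T nums.length maxC ((R - 1).toNat + 1) 1 R
          else bsA T nums.length maxC ((R - 1).toNat + 1) 1 R - 1)
      = (if checkB tab nums.length maxC (bsB tab nums.length maxC ((R - 1).toNat + 1) 1 R) = true
          then bsB tab nums.length maxC ((R - 1).toNat + 1) 1 R
          else bsB tab nums.length maxC ((R - 1).toNat + 1) 1 R - 1)
    by_cases hmc : 0 ≤ maxC
    · have hbse := bs_eq nums maxC hmc ((R-1).toNat+1) 1 R (by omega)
      rw [← hT, ← htab] at hbse
      have hb1 := bs_bounds nums maxC ((R-1).toNat+1) 1 R (by omega)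
      rw [← hT] at hb1
      rw [hbse] at hb1 ⊢
      have hce := check_eq nums maxC (bsB tab nums.length maxC ((R - 1).toNat + 1) 1 R) hmc hb1
      rw [← hT, ← htab] at hce
      rw [hce]
    · have hmc2 : maxC ≤ -2 := by
        unfold Pre_minStable at hPre
        omega
      have hRle : R ≤ 0 := by
        rw [hR]
        exact floordiv_nonpos_of_neg _ _ (by omega) (by omega)
      have hLA : bsA T nums.length maxC ((R-1).toNat+1) 1 R = 1 := by
        show (if (1:Int) < R then _ else (1:Int)) = 1
        rw [if_neg (by omega)]
      have hLB : bsB tab nums.length maxC ((R-1).toNat+1) 1 R = 1 := by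
        show (if (1:Int) < R then _ else (1:Int)) = 1
        rw [if_neg (by omega)]
      rw [hLA, hLB]
      have hcA : checkA T nums.length maxC 1 = true := by
        unfold checkA
        rw [if_pos rfl]
      have hcB : checkB tab nums.length maxC 1 = true := by
        unfold checkB
        rw [if_pos rfl]
      rw [hcA, hcB]
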